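-- pv_equiv track=rewrite | github.com/LadyElinor/Noether-Lefschetz-Pilot | nl_quartic_line_sampling.py | elliptic_v3_weierstrass_incident_count
-- ===== SOURCE A (Python) =====
-- from typing import Dict, List, Sequence, Tuple
--
-- Exp4 = Tuple[int, int, int, int]
--
-- def _restrict_to_w0(coeffs: Dict[Exp4, int]) -> Dict[Tuple[int, int, int], int]:
--     out: Dict[Tuple[int, int, int], int] = {}
--     for (a, b, c, d), v in coeffs.items():
--         if v != 0 and d == 0:
--             out[(a, b, c)] = out.get((a, b, c), 0) + v
--     return {k: v for k, v in out.items() if v != 0}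
--
-- def _mul_poly3_linear(
--     cubic: Dict[Tuple[int, int, int], int],
--     linear: Tuple[int, int, int],
-- ) -> Dict[Tuple[int, int, int], int]:
--     lx, ly, lz = linear
--     out: Dict[Tuple[int, int, int], int] = {}
--     for (a, b, c), v in cubic.items():
--         if lx != 0:
--             out[(a + 1, b, c)] = out.get((a + 1, b, c), 0) + v * lx
--         if ly != 0:
--             out[(a, b + 1, c)] = out.get((a, b + 1, c), 0) + v * ly
--         if lz != 0:
--             out[(a, b, c + 1)] = out.get((a, b, c + 1), 0) + v * lz
--     return {k: v for k, v in out.items() if v != 0}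
--
-- def _proportional_nonzero(
--     a: Dict[Tuple[int, int, int], int],
--     b: Dict[Tuple[int, int, int], int],
-- ) -> bool:
--     if not a or not b:
--         return False
--     if set(a.keys()) != set(b.keys()):
--         return False
--     keys = list(a.keys())
--     k0 = keys[0]
--     av0 = a[k0]
--     bv0 = b[k0]
--     for k in keys[1:]:
--         if a[k] * bv0 != b[k] * av0:
--             return False
--     return True
--
-- def _weierstrass_plane_cubic(a: int, b: int) -> Dict[Tuple[int, int, int], int]:
--     # y^2 z - x^3 - a x z^2 - b z^3 in (x,y,z).
--     return {
--         (0, 2, 1): 1,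
--         (3, 0, 0): -1,
--         (1, 0, 2): -a,
--         (0, 0, 3): -b,
--     }
--
-- def elliptic_v3_weierstrass_incident_count(coeffs: Dict[Exp4, int]) -> int:
--     """
--     v3 heuristic detector:
--     Compare F|_{w=0} against a small bank of low-height Weierstrass-plane products C3*L.
--     Incidents are template matches up to scalar in coefficient space (heuristic only).
--     """
--     restricted = _restrict_to_w0(coeffs)
--     if not restricted:
--         return 0
--     bank = [
--         (-1, 0, (1, 1, 1)),
--         (-2, 3, (1, 1, 1)),
--         (1, -1, (1, -1, 2)),
--     ]
--     hits = 0
--     for aa, bb, lin in bank: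
--         target = _mul_poly3_linear(_weierstrass_plane_cubic(aa, bb), lin)
--         if _proportional_nonzero(restricted, target):
--             hits += 1
--     return hits
-- ===== SOURCE B (Python) =====
-- # B: template-table matcher. The three bank products C3*L are precomputed once as
-- # literal (key, value) item lists; a polynomial matches a template iff it has the
-- # same number of terms, a nonzero coefficient at the template's pivot monomial, and
-- # all cross-multiplied coefficient equations against that pivot hold. This removes
-- # the per-call symbolic cubic*linear construction, the key-set comparison and the
-- # first-insertion-key pivot of A.
--
-- _TARGETS = [
--     [((1, 2, 1), 1), ((0, 3, 1), 1), ((0, 2, 2), 1), ((4, 0, 0), -1),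
--      ((3, 1, 0), -1), ((3, 0, 1), -1), ((2, 0, 2), 1), ((1, 1, 2), 1),
--      ((1, 0, 3), 1)],
--     [((1, 2, 1), 1), ((0, 3, 1), 1), ((0, 2, 2), 1), ((4, 0, 0), -1),
--      ((3, 1, 0), -1), ((3, 0, 1), -1), ((2, 0, 2), 2), ((1, 1, 2), 2),
--      ((1, 0, 3), -1), ((0, 1, 3), -3), ((0, 0, 4), -3)],
--     [((1, 2, 1), 1), ((0, 3, 1), -1), ((0, 2, 2), 2), ((4, 0, 0), -1),
--      ((3, 1, 0), 1), ((3, 0, 1), -2), ((2, 0, 2), -1), ((1, 1, 2), 1),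
--      ((1, 0, 3), -1), ((0, 1, 3), -1), ((0, 0, 4), 2)],
-- ]
--
--
-- def elliptic_v3_weierstrass_incident_count(coeffs):
--     restricted = {}
--     for (a, b, c, d), v in coeffs.items():
--         if v != 0 and d == 0:
--             restricted[(a, b, c)] = restricted.get((a, b, c), 0) + v
--     restricted = {k: v for k, v in restricted.items() if v != 0}
--     hits = 0
--     for titems in _TARGETS:
--         if len(restricted) != len(titems):
--             continue
--         p, t0 = titems[0]
--         v0 = restricted.get(p, 0)
--         if v0 == 0:
--             continue
--         if all(restricted.get(k, 0) * t0 == tv * v0 for k, tv in titems):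
--             hits += 1
--     return hits
-- ===== Notes on version B (the rewrite author's own statement) =====
-- stated objective: alternative
-- what changed: A builds each bank target by symbolic cubic-times-linear polynomial multiplication on every call and tests proportionality via key-set equality plus cross-products pivoted on the restricted dict's first insertion key; B stores the three target polynomials as precomputed literal item tables and matches by term count, a nonzero coefficient at the template's own pivot monomial, and cross-multiplied coefficient equations against that pivot.
import Mathlib
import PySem

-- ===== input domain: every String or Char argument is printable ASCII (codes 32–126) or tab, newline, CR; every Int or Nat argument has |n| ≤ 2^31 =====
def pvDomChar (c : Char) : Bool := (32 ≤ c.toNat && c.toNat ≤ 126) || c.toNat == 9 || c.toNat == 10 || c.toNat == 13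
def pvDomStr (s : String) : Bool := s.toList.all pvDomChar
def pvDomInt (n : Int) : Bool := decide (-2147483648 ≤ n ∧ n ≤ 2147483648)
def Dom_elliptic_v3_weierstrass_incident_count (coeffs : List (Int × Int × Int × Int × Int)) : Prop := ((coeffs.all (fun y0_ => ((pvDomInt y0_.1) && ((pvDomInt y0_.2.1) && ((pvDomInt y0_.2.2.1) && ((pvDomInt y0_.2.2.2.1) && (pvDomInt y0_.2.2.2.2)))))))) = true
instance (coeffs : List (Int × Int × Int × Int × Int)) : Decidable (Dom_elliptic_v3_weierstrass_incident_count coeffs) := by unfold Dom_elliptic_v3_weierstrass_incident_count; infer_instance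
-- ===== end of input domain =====

-- B replaces A's per-call symbolic construction of the three bank products C3*L and its
-- set-equality + first-insertion-pivot proportionality test by a literal template table
-- matched via term count + cross-multiplication against the template's own pivot monomial
-- (objective: alternative decomposition, same cost).

-- ===== PORT A =====
-- _restrict_to_w0
def pvRestrictA (coeffs : PySem.Dict (Int × Int × Int × Int) Int) :
    PySem.Dict (Int × Int × Int) Int :=
  let out := coeffs.items.foldl
    (fun (out : PySem.Dict (Int × Int × Int) Int) kv =>
      let ((a, b, c, d), v) := kv
      if v != 0 && d == 0 then out.insert (a, b, c) (out.getD (a, b, c) 0 + v) else out)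
    PySem.Dict.empty
  -- {k: v for k, v in out.items() if v != 0}
  PySem.Dict.ofList (out.items.filter (fun p => p.2 != 0))

-- _mul_poly3_linear
def pvMulA (cubic : PySem.Dict (Int × Int × Int) Int) (linear : Int × Int × Int) :
    PySem.Dict (Int × Int × Int) Int :=
  let (lx, ly, lz) := linear
  let out := cubic.items.foldl
    (fun (out : PySem.Dict (Int × Int × Int) Int) kv =>
      let ((a, b, c), v) := kv
      let out := if lx != 0 then out.insert (a + 1, b, c) (out.getD (a + 1, b, c) 0 + v * lx) else out
      let out := if ly != 0 then out.insert (a, b + 1, c) (out.getD (a, b + 1, c) 0 + v * ly) else out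
      if lz != 0 then out.insert (a, b, c + 1) (out.getD (a, b, c + 1) 0 + v * lz) else out)
    PySem.Dict.empty
  PySem.Dict.ofList (out.items.filter (fun p => p.2 != 0))

-- _proportional_nonzero  (a[k0]/b[k] are present-key lookups; getD _ 0 is exact there)
def pvPropA (a b : PySem.Dict (Int × Int × Int) Int) : Bool :=
  if a.items.isEmpty || b.items.isEmpty then false
  else if !(PySem.Set.equal (PySem.Set.ofList a.keys) (PySem.Set.ofList b.keys)) then false
  else
    match a.keys with
    | [] => false  -- unreachable: a nonempty
    | k0 :: rest =>
      let av0 := a.getD k0 0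
      let bv0 := b.getD k0 0
      rest.all (fun k => a.getD k 0 * bv0 == b.getD k 0 * av0)

-- _weierstrass_plane_cubic
def pvCubicA (a b : Int) : PySem.Dict (Int × Int × Int) Int :=
  PySem.Dict.ofList [((0, 2, 1), 1), ((3, 0, 0), -1), ((1, 0, 2), -a), ((0, 0, 3), -b)]

def elliptic_v3_weierstrass_incident_count (coeffs : List (Int × Int × Int × Int × Int)) : Int :=
  let d := PySem.Dict.ofList (coeffs.map (fun t => ((t.1, t.2.1, t.2.2.1, t.2.2.2.1), t.2.2.2.2)))
  let restricted := pvRestrictA d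
  if restricted.items.isEmpty then 0
  else
    let bank : List (Int × Int × (Int × Int × Int)) :=
      [(-1, 0, (1, 1, 1)), (-2, 3, (1, 1, 1)), (1, -1, (1, -1, 2))]
    bank.foldl
      (fun hits e =>
        let (aa, bb, lin) := e
        if pvPropA restricted (pvMulA (pvCubicA aa bb) lin) then hits + 1 else hits)
      0

-- ===== PORT B =====
def pvTargetsB : List (List ((Int × Int × Int) × Int)) :=
  [[((1, 2, 1), 1), ((0, 3, 1), 1), ((0, 2, 2), 1), ((4, 0, 0), -1),
    ((3, 1, 0), -1), ((3, 0, 1), -1), ((2, 0, 2), 1), ((1, 1, 2), 1),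
    ((1, 0, 3), 1)],
   [((1, 2, 1), 1), ((0, 3, 1), 1), ((0, 2, 2), 1), ((4, 0, 0), -1),
    ((3, 1, 0), -1), ((3, 0, 1), -1), ((2, 0, 2), 2), ((1, 1, 2), 2),
    ((1, 0, 3), -1), ((0, 1, 3), -3), ((0, 0, 4), -3)],
   [((1, 2, 1), 1), ((0, 3, 1), -1), ((0, 2, 2), 2), ((4, 0, 0), -1),
    ((3, 1, 0), 1), ((3, 0, 1), -2), ((2, 0, 2), -1), ((1, 1, 2), 1),
    ((1, 0, 3), -1), ((0, 1, 3), -1), ((0, 0, 4), 2)]]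

-- the per-template check of Source B's main loop (continue-chain as a Bool)
def pvMatchB (restricted : PySem.Dict (Int × Int × Int) Int)
    (titems : List ((Int × Int × Int) × Int)) : Bool :=
  if restricted.size != titems.length then false
  else
    match titems with
    | [] => false  -- unreachable: every template in pvTargetsB is nonempty (titems[0] in Source B)
    | (p, t0) :: _ =>
      let v0 := restricted.getD p 0
      if v0 == 0 then false
      else titems.all (fun kt => restricted.getD kt.1 0 * t0 == kt.2 * v0)

def elliptic_v3_weierstrass_incident_count_alt (coeffs : List (Int × Int × Int × Int × Int)) : Int :=
  let d := PySem.Dict.ofList (coeffs.map (fun t => ((t.1, t.2.1, t.2.2.1, t.2.2.2.1), t.2.2.2.2)))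
  let restricted0 := d.items.foldl
    (fun (out : PySem.Dict (Int × Int × Int) Int) kv =>
      let ((a, b, c, d), v) := kv
      if v != 0 && d == 0 then out.insert (a, b, c) (out.getD (a, b, c) 0 + v) else out)
    PySem.Dict.empty
  let restricted := PySem.Dict.ofList (restricted0.items.filter (fun p => p.2 != 0))
  pvTargetsB.foldl (fun hits t => if pvMatchB restricted t then hits + 1 else hits) 0

-- ===== PRECONDITION & SPEC =====
def Spec_elliptic_v3_weierstrass_incident_count (coeffs : List (Int × Int × Int × Int × Int)) (out : Int) : Prop := out = elliptic_v3_weierstrass_incident_count_alt coeffs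
instance (coeffs : List (Int × Int × Int × Int × Int)) (out : Int) : Decidable (Spec_elliptic_v3_weierstrass_incident_count coeffs out) := by unfold Spec_elliptic_v3_weierstrass_incident_count; infer_instance

-- ===== CLAIM (what is proved, stated in full; the proofs are below) =====
def Claim_equal_elliptic_v3_weierstrass_incident_count : Prop := ∀ (coeffs : List (Int × Int × Int × Int × Int)), Dom_elliptic_v3_weierstrass_incident_count coeffs → Spec_elliptic_v3_weierstrass_incident_count coeffs (elliptic_v3_weierstrass_incident_count coeffs)

-- ===== LEMMAS AND PROOFS =====

-- every item of a dict built by ofList is one of the input pairs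
theorem pvFoldInsertItemsSub {κ ν : Type} [BEq κ] [LawfulBEq κ] (l : List (κ × ν)) :
    ∀ (d : PySem.Dict κ ν) (p : κ × ν),
      p ∈ (l.foldl (fun d q => d.insert q.1 q.2) d).items → p ∈ d.items ∨ p ∈ l := by
  induction l with
  | nil => intro d p hp; exact Or.inl hp
  | cons x xs ih =>
    intro d p hp
    rcases ih (d.insert x.1 x.2) p hp with h | h
    · rcases (PySem.Dict.mem_items_insert d x.1 x.2 p).mp h with h | ⟨h, _⟩
      · exact Or.inr (by simp [h])
      · exact Or.inl h
    · exact Or.inr (List.mem_cons_of_mem _ h)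

theorem pvMemItemsOfList {κ ν : Type} [BEq κ] [LawfulBEq κ] (l : List (κ × ν)) :
    ∀ p ∈ (PySem.Dict.ofList l).items, p ∈ l := by
  intro p hp
  rcases pvFoldInsertItemsSub l PySem.Dict.empty p hp with h | h
  · rw [show (PySem.Dict.empty : PySem.Dict κ ν).items = [] from rfl] at h; cases h
  · exact h

-- pivot change for cross-multiplied proportionality
theorem pvPivot {rk rp rq tk tp tq : Int} (hrp : rp ≠ 0)
    (h1 : rk * tp = tk * rp) (h2 : rq * tp = tq * rp) : rk * tq = tk * rq := by
  have h : rk * tq * rp = tk * rq * rp := by linear_combination rq * h1 - rk * h2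
  exact mul_right_cancel₀ hrp h

-- a key is in r iff its stored coefficient is nonzero (all values of r are nonzero)
theorem pvKeyIffGetD (r : PySem.Dict (Int × Int × Int) Int)
    (hrk : r.keys.Nodup) (hrv : ∀ p ∈ r.items, p.2 ≠ 0) (k : Int × Int × Int) :
    k ∈ r.keys ↔ r.getD k 0 ≠ 0 := by
  constructor
  · intro hk
    rcases List.mem_map.mp (show k ∈ r.items.map Prod.fst from hk) with ⟨q, hq, hq1⟩
    have hkv : (k, q.2) ∈ r.items := by rw [← hq1]; simpa using hq
    rw [PySem.Dict.getD_of_mem_items r hkv hrk 0]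
    exact hrv q hq
  · intro hne
    by_contra hk
    have hc : r.contains k = false := by
      cases hcc : r.contains k with
      | false => rfl
      | true => exact absurd ((PySem.Dict.contains_iff_mem_keys r k).mp hcc) hk
    exact hne (PySem.Dict.getD_of_not_contains r 0 hc)

theorem pvMatchB_iff (r : PySem.Dict (Int × Int × Int) Int) (p : Int × Int × Int) (t0 : Int)
    (ts : List ((Int × Int × Int) × Int)) :
    pvMatchB r ((p, t0) :: ts) = true ↔
      (r.size = ((p, t0) :: ts).length ∧ r.getD p 0 ≠ 0 ∧
        ∀ kt ∈ (p, t0) :: ts, r.getD kt.1 0 * t0 = kt.2 * r.getD p 0) := by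
  by_cases h1 : r.size = ((p, t0) :: ts).length
  · by_cases h2 : r.getD p 0 = 0
    · simp [pvMatchB, h1, h2]
    · simp [pvMatchB, h1, h2, List.all_eq_true, beq_iff_eq]
  · simp [pvMatchB]

theorem pvPropA_iff (a b : PySem.Dict (Int × Int × Int) Int) (k0 : Int × Int × Int)
    (rest : List (Int × Int × Int)) (hk : a.keys = k0 :: rest) (hbne : b.items ≠ [])
    (han : a.keys.Nodup) (hbn : b.keys.Nodup) :
    pvPropA a b = true ↔
      ((∀ x, x ∈ a.keys ↔ x ∈ b.keys) ∧
        ∀ k ∈ rest, a.getD k 0 * b.getD k0 0 = b.getD k 0 * a.getD k0 0) := by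
  have hane : a.items ≠ [] := by
    intro h
    rw [show a.keys = a.items.map Prod.fst from rfl, h] at hk
    exact List.cons_ne_nil _ _ hk.symm
  have ha' : a.items.isEmpty = false := by
    cases h : a.items with
    | nil => exact absurd h hane
    | cons _ _ => rfl
  have hb' : b.items.isEmpty = false := by
    cases h : b.items with
    | nil => exact absurd h hbne
    | cons _ _ => rfl
  by_cases heq : ∀ x : Int × Int × Int, x ∈ a.keys ↔ x ∈ b.keys
  · have hEq' : PySem.Set.equal (PySem.Set.ofList (k0 :: rest)) (PySem.Set.ofList b.keys) = true := by
      rw [← hk, PySem.Set.ofList_eq_self_of_nodup _ han, PySem.Set.ofList_eq_self_of_nodup _ hbn]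
      exact (PySem.Set.equal_iff _ _).mpr heq
    simp [pvPropA, ha', hb', hEq', hk, List.all_eq_true, beq_iff_eq]
    intro _ x1 x2 x3
    have := heq (x1, x2, x3)
    rw [hk] at this
    simpa using this
  · have hEq : PySem.Set.equal (PySem.Set.ofList a.keys) (PySem.Set.ofList b.keys) = false := by
      rw [PySem.Set.ofList_eq_self_of_nodup _ han, PySem.Set.ofList_eq_self_of_nodup _ hbn]
      cases hE : PySem.Set.equal a.keys b.keys with
      | false => rfl
      | true => exact absurd ((PySem.Set.equal_iff _ _).mp hE) heq
    simp [pvPropA, ha', hb', hEq]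
    intro h
    exact (heq (fun x => by obtain ⟨x1, x2, x3⟩ := x; exact h x1 x2 x3)).elim

-- the heart: A's proportionality test against a dict b equals B's template match on b's items
theorem pvPropEqMatch (r b : PySem.Dict (Int × Int × Int) Int)
    (titems : List ((Int × Int × Int) × Int))
    (hb : b.items = titems) (hne : titems ≠ [])
    (htk : (titems.map Prod.fst).Nodup) (htv : ∀ p ∈ titems, p.2 ≠ 0)
    (hrk : r.keys.Nodup) (hrv : ∀ p ∈ r.items, p.2 ≠ 0) :
    pvPropA r b = pvMatchB r titems := by
  rcases titems with _ | ⟨⟨p, t0⟩, ts⟩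
  · exact absurd rfl hne
  have hbk : b.keys = ((p, t0) :: ts).map Prod.fst := by
    rw [show b.keys = b.items.map Prod.fst from rfl, hb]
  have hbn : b.keys.Nodup := by rw [hbk]; exact htk
  have hbv : ∀ q ∈ b.items, q.2 ≠ 0 := by rw [hb]; exact htv
  have hR := pvKeyIffGetD r hrk hrv
  have hbget : ∀ kt ∈ (p, t0) :: ts, b.getD kt.1 0 = kt.2 := by
    intro kt hkt
    exact PySem.Dict.getD_of_mem_items b (by rw [hb]; simpa using hkt) hbn 0
  have ht0 : b.getD p 0 = t0 := hbget (p, t0) (by simp)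
  have hpB : p ∈ b.keys := by rw [hbk]; simp
  have hlenK : b.keys.length = ((p, t0) :: ts).length := by rw [hbk]; simp
  have hrlen : r.size = r.keys.length := by
    rw [show r.size = r.items.length from rfl,
      show r.keys = r.items.map Prod.fst from rfl, List.length_map]
  rw [Bool.eq_iff_iff]
  cases hri : r.items with
  | nil =>
    have hsz : r.size = 0 := by
      rw [show r.size = r.items.length from rfl, hri]; rfl
    constructor
    · intro h; simp [pvPropA, hri] at h
    · intro h
      rw [pvMatchB_iff] at h
      have h0 := h.1
      rw [hsz] at h0
      exact absurd h0 (by simp)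
  | cons i is =>
    have hkne : r.keys ≠ [] := by
      rw [show r.keys = r.items.map Prod.fst from rfl, hri]; simp
    obtain ⟨k0, rest, hk⟩ : ∃ k0 rest, r.keys = k0 :: rest := by
      cases h : r.keys with
      | nil => exact absurd h hkne
      | cons x xs => exact ⟨x, xs, rfl⟩
    have hbne' : b.items ≠ [] := by rw [hb]; simp
    have hk0mem : k0 ∈ r.keys := by rw [hk]; simp
    rw [pvPropA_iff r b k0 rest hk hbne' hrk hbn, pvMatchB_iff]
    constructor
    · rintro ⟨hiff, hprop⟩
      have hperm : r.keys.Perm b.keys := (List.perm_ext_iff_of_nodup hrk hbn).mpr hiff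
      have hlen : r.size = ((p, t0) :: ts).length := by
        rw [hrlen, hperm.length_eq, hlenK]
      have hpR : p ∈ r.keys := (hiff p).mpr hpB
      have hv0 : r.getD p 0 ≠ 0 := (hR p).mp hpR
      refine ⟨hlen, hv0, ?_⟩
      have hall : ∀ k ∈ r.keys, r.getD k 0 * b.getD k0 0 = b.getD k 0 * r.getD k0 0 := by
        intro k hkmem
        rw [hk] at hkmem
        rcases List.mem_cons.mp hkmem with rfl | hmem
        · ring
        · exact hprop k hmem
      have hav0 : r.getD k0 0 ≠ 0 := (hR k0).mp hk0mem
      intro kt hkt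
      have hktR : kt.1 ∈ r.keys := (hiff kt.1).mpr (by rw [hbk]; exact List.mem_map.mpr ⟨kt, hkt, rfl⟩)
      have hcross := pvPivot hav0 (hall kt.1 hktR) (hall p hpR)
      rw [← ht0, ← hbget kt hkt]
      exact hcross
    · rintro ⟨hlen, hv0, hprop⟩
      have hsub : b.keys ⊆ r.keys := by
        intro x hx
        rw [hbk] at hx
        rcases List.mem_map.mp hx with ⟨kt, hkt, rfl⟩
        have hne0 : r.getD kt.1 0 * t0 ≠ 0 := by
          rw [hprop kt hkt]
          exact mul_ne_zero (htv kt hkt) hv0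
        exact (hR kt.1).mpr (left_ne_zero_of_mul hne0)
      have hll : r.keys.length = ((p, t0) :: ts).length := by
        rw [← hrlen]; exact hlen
      have hperm : b.keys.Perm r.keys :=
        List.Subperm.perm_of_length_le (List.subperm_of_subset hbn hsub)
          (le_of_eq (by rw [hll, hlenK]))
      have hiff : ∀ x, x ∈ r.keys ↔ x ∈ b.keys := fun x => (hperm.mem_iff).symm
      refine ⟨hiff, ?_⟩
      have hAll : ∀ k ∈ b.keys, r.getD k 0 * b.getD p 0 = b.getD k 0 * r.getD p 0 := by
        intro k hkmem
        rw [hbk] at hkmem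
        rcases List.mem_map.mp hkmem with ⟨kt, hkt, rfl⟩
        rw [ht0, hbget kt hkt]
        exact hprop kt hkt
      intro k hkrest
      have hkb : k ∈ b.keys := (hiff k).mp (by rw [hk]; exact List.mem_cons_of_mem _ hkrest)
      have hk0b : k0 ∈ b.keys := (hiff k0).mp hk0mem
      exact pvPivot hv0 (hAll k hkb) (hAll k0 hk0b)

-- A's main body and B's main body as functions of the restricted dict
def pvAHits (r : PySem.Dict (Int × Int × Int) Int) : Int :=
  if r.items.isEmpty then 0
  else
    let bank : List (Int × Int × (Int × Int × Int)) :=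
      [(-1, 0, (1, 1, 1)), (-2, 3, (1, 1, 1)), (1, -1, (1, -1, 2))]
    bank.foldl
      (fun hits e =>
        let (aa, bb, lin) := e
        if pvPropA r (pvMulA (pvCubicA aa bb) lin) then hits + 1 else hits)
      0

def pvBHits (r : PySem.Dict (Int × Int × Int) Int) : Int :=
  pvTargetsB.foldl (fun hits t => if pvMatchB r t then hits + 1 else hits) 0

theorem pvHits (r : PySem.Dict (Int × Int × Int) Int)
    (hrk : r.keys.Nodup) (hrv : ∀ p ∈ r.items, p.2 ≠ 0) :
    pvAHits r = pvBHits r := by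
  have e1 : pvPropA r (pvMulA (pvCubicA (-1) 0) (1, 1, 1))
      = pvMatchB r [((1, 2, 1), 1), ((0, 3, 1), 1), ((0, 2, 2), 1), ((4, 0, 0), -1),
          ((3, 1, 0), -1), ((3, 0, 1), -1), ((2, 0, 2), 1), ((1, 1, 2), 1), ((1, 0, 3), 1)] :=
    pvPropEqMatch r _ _ (by decide) (by decide) (by decide) (by decide) hrk hrv
  have e2 : pvPropA r (pvMulA (pvCubicA (-2) 3) (1, 1, 1))
      = pvMatchB r [((1, 2, 1), 1), ((0, 3, 1), 1), ((0, 2, 2), 1), ((4, 0, 0), -1),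
          ((3, 1, 0), -1), ((3, 0, 1), -1), ((2, 0, 2), 2), ((1, 1, 2), 2),
          ((1, 0, 3), -1), ((0, 1, 3), -3), ((0, 0, 4), -3)] :=
    pvPropEqMatch r _ _ (by decide) (by decide) (by decide) (by decide) hrk hrv
  have e3 : pvPropA r (pvMulA (pvCubicA 1 (-1)) (1, -1, 2))
      = pvMatchB r [((1, 2, 1), 1), ((0, 3, 1), -1), ((0, 2, 2), 2), ((4, 0, 0), -1),
          ((3, 1, 0), 1), ((3, 0, 1), -2), ((2, 0, 2), -1), ((1, 1, 2), 1),
          ((1, 0, 3), -1), ((0, 1, 3), -1), ((0, 0, 4), 2)] :=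
    pvPropEqMatch r _ _ (by decide) (by decide) (by decide) (by decide) hrk hrv
  simp only [pvAHits, pvBHits, pvTargetsB, List.foldl]
  rw [e1, e2, e3]
  by_cases hre : r.items = []
  · have hsz : r.size = 0 := by
      rw [show r.size = r.items.length from rfl, hre]; rfl
    simp [hre, pvMatchB, hsz]
  · have hie : r.items.isEmpty = false := by
      cases h : r.items with
      | nil => exact absurd h hre
      | cons _ _ => rfl
    simp [hie]

-- ===== VERDICT (by name: the statement is the Claim_ definition above) =====
theorem elliptic_v3_weierstrass_incident_count_spec : Claim_equal_elliptic_v3_weierstrass_incident_count := by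
  intro coeffs _
  unfold Spec_elliptic_v3_weierstrass_incident_count
  have h1 : elliptic_v3_weierstrass_incident_count coeffs
      = pvAHits (pvRestrictA (PySem.Dict.ofList
          (coeffs.map (fun t => ((t.1, t.2.1, t.2.2.1, t.2.2.2.1), t.2.2.2.2))))) := rfl
  have h2 : elliptic_v3_weierstrass_incident_count_alt coeffs
      = pvBHits (pvRestrictA (PySem.Dict.ofList
          (coeffs.map (fun t => ((t.1, t.2.1, t.2.2.1, t.2.2.2.1), t.2.2.2.2))))) := rfl
  rw [h1, h2]
  refine pvHits _ ?_ ?_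
  · exact PySem.Dict.nodup_keys_ofList _
  · intro q hq
    have hq' := pvMemItemsOfList _ q hq
    have := (List.mem_filter.mp hq').2
    simpa using this
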